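-- pv_equiv track=rewrite | github.com/Mamiglia/NBD-DC_HW1 | package/graph_utilities.py | count_closest
-- ===== SOURCE A (Python) =====
-- def count_closest(h: dict, N : int) -> dict:
--     r = {}
--     for h,n in sorted(h.items(), key=lambda x: x[0]):
--         n_0 = min(n, N)
--         N -= n_0
--         r[h] = n_0
--         if N == 0:
--             break
--
--     return r
-- ===== SOURCE B (Python) =====
-- def count_closest(h: dict, N: int) -> dict:
--     # Prefix-sum decomposition: sort once, build cumulative sums, locate the
--     # cutoff index, then assemble the answer from a slice plus one capped entry.
--     items = sorted(h.items(), key=lambda x: x[0])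
--     sums = []
--     s = 0
--     for _, v in items:
--         s += v
--         sums.append(s)
--     for i, t in enumerate(sums):
--         if t >= N:
--             r = dict(items[:i])
--             r[items[i][0]] = N - (t - items[i][1])
--             return r
--     return dict(items)
-- ===== Notes on version B (the rewrite author's own statement) =====
-- stated objective: alternative
-- what changed: A's single stateful greedy loop (running budget, mutate-and-break) is replaced by a prefix-sum decomposition: sort once, build the cumulative-sum list, find the first index where the cumulative sum reaches N, then emit the slice before it plus one capped entry (or all items if the sum never reaches N).
import Mathlib
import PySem

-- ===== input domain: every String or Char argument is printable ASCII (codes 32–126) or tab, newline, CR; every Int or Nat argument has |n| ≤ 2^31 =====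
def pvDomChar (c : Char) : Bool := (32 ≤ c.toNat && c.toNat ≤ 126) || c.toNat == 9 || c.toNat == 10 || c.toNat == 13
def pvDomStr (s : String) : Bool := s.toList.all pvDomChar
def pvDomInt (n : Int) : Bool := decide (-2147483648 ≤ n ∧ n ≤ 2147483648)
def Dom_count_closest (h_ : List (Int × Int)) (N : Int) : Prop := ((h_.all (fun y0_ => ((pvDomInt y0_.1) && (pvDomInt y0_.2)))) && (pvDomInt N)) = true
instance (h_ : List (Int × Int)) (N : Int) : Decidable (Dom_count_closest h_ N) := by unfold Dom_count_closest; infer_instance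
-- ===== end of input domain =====

-- B replaces A's single stateful greedy loop by a prefix-sum decomposition
-- (sort, cumulative sums, cutoff index, slice + one capped entry); objective:
-- alternative decomposition, same asymptotic cost.

-- ===== PORT A =====
-- the 'for h,n in sorted(...)' loop with the budget N, the result dict r, and the break
def pvLoopA : List (Int × Int) → Int → PySem.Dict Int Int → PySem.Dict Int Int
  | [], _, r => r
  | (k, n) :: rest, N, r =>
    let n0 := min n N
    let N' := N - n0
    let r' := r.insert k n0
    if N' = 0 then r' else pvLoopA rest N' r'

def count_closest (h_ : List (Int × Int)) (N : Int) : List (Int × Int) :=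
  (pvLoopA (PySem.List.sorted (PySem.Dict.ofList h_).items (fun x => x.1) false) N
    PySem.Dict.empty).items

-- ===== PORT B =====
def count_closest_alt (h_ : List (Int × Int)) (N : Int) : List (Int × Int) :=
  let items := PySem.List.sorted (PySem.Dict.ofList h_).items (fun x => x.1) false
  -- the 'for _, v in items: s += v; sums.append(s)' loop (two accumulators s, sums)
  let sums := (items.foldl (fun st x => (st.1 + x.2, st.2 ++ [st.1 + x.2]))
                ((0 : Int), ([] : List Int))).2
  -- 'for i, t in enumerate(sums): if t >= N: return ...' = first index where t >= N
  match sums.findIdx? (fun t => decide (N ≤ t)) with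
  | some i =>
      let t := PySem.List.pyGetD sums (i : Int) 0
      let p := PySem.List.pyGetD items (i : Int) ((0 : Int), (0 : Int))
      ((PySem.Dict.ofList (PySem.List.slice items none (some (i : Int)))).insert p.1
        (N - (t - p.2))).items
  | none => (PySem.Dict.ofList items).items

-- ===== PRECONDITION & SPEC =====
def Spec_count_closest (h_ : List (Int × Int)) (N : Int) (out : List (Int × Int)) : Prop := out = count_closest_alt h_ N
instance (h_ : List (Int × Int)) (N : Int) (out : List (Int × Int)) : Decidable (Spec_count_closest h_ N out) := by unfold Spec_count_closest; infer_instance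

-- ===== CLAIM (what is proved, stated in full; the proofs are below) =====
def Claim_equal_count_closest : Prop := ∀ (h_ : List (Int × Int)) (N : Int), Dom_count_closest h_ N → Spec_count_closest h_ N (count_closest h_ N)

-- ===== LEMMAS AND PROOFS =====

-- the list A's loop produces: capped values up to and including the cutoff entry
def pvEmit : List (Int × Int) → Int → List (Int × Int)
  | [], _ => []
  | (k, n) :: rest, N =>
    let n0 := min n N
    if N - n0 = 0 then [(k, n0)] else (k, n0) :: pvEmit rest (N - n0)

-- the cumulative-sums list of B, as its own definition
def pvSums (l : List (Int × Int)) : List Int :=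
  (l.foldl (fun st x => (st.1 + x.2, st.2 ++ [st.1 + x.2])) ((0 : Int), ([] : List Int))).2

-- B's body after the shared sorted items list has been abstracted out
def pvB (l : List (Int × Int)) (N : Int) : List (Int × Int) :=
  match (pvSums l).findIdx? (fun t => decide (N ≤ t)) with
  | some i =>
      ((PySem.Dict.ofList (PySem.List.slice l none (some (i : Int)))).insert
        (PySem.List.pyGetD l (i : Int) ((0 : Int), (0 : Int))).1
        (N - (PySem.List.pyGetD (pvSums l) (i : Int) 0
              - (PySem.List.pyGetD l (i : Int) ((0 : Int), (0 : Int))).2))).items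
  | none => (PySem.Dict.ofList l).items

lemma pvB_some {l : List (Int × Int)} {N : Int} {i : Nat}
    (h : (pvSums l).findIdx? (fun t => decide (N ≤ t)) = some i) :
    pvB l N = ((PySem.Dict.ofList (PySem.List.slice l none (some (i : Int)))).insert
        (PySem.List.pyGetD l (i : Int) ((0 : Int), (0 : Int))).1
        (N - (PySem.List.pyGetD (pvSums l) (i : Int) 0
              - (PySem.List.pyGetD l (i : Int) ((0 : Int), (0 : Int))).2))).items := by
  simp [pvB, h]

lemma pvB_none {l : List (Int × Int)} {N : Int}
    (h : (pvSums l).findIdx? (fun t => decide (N ≤ t)) = none) :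
    pvB l N = (PySem.Dict.ofList l).items := by
  simp [pvB, h]

lemma pvFold_snd (l : List (Int × Int)) (s : Int) (acc : List Int) :
    (l.foldl (fun st x => (st.1 + x.2, st.2 ++ [st.1 + x.2])) (s, acc)).2
      = acc ++ (pvSums l).map (s + ·) := by
  induction l generalizing s acc with
  | nil => simp [pvSums]
  | cons x l ih =>
    obtain ⟨k, v⟩ := x
    have h2 : pvSums ((k, v) :: l) = (0 + v) :: (pvSums l).map ((0 + v) + ·) := by
      show (l.foldl _ (0 + v, [] ++ [0 + v])).2 = _
      rw [ih]; simp
    simp only [List.foldl_cons]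
    rw [ih, h2]
    simp [List.map_map, Function.comp_def, add_assoc]

lemma pvSums_cons (k v : Int) (l : List (Int × Int)) :
    pvSums ((k, v) :: l) = v :: (pvSums l).map (v + ·) := by
  show (l.foldl _ (0 + v, [] ++ [0 + v])).2 = _
  rw [pvFold_snd]; simp

lemma pvSums_length (l : List (Int × Int)) : (pvSums l).length = l.length := by
  induction l with
  | nil => simp [pvSums]
  | cons x l ih => cases x; rw [pvSums_cons]; simp [ih]

lemma pv_not_mem_take {α : Type} (m : List α) (j : Nat) (hj : j < m.length)
    (hn : m.Nodup) : m[j] ∉ m.take j := by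
  intro hmem
  obtain ⟨i, hi, heq⟩ := List.getElem_of_mem hmem
  rw [List.length_take] at hi
  have hij : i < j := by omega
  rw [List.getElem_take] at heq
  have := (List.Nodup.getElem_inj_iff hn).1 heq
  omega

lemma pv_items_ofList {l : List (Int × Int)} (h : (l.map Prod.fst).Nodup) :
    (PySem.Dict.ofList l).items = l := by
  have h1 := PySem.Dict.items_foldl_insert_fresh l Prod.fst Prod.snd PySem.Dict.empty
    (by intro a _; simp [pysem]) h
  have h2 : PySem.Dict.ofList l
      = List.foldl (fun d (a : Int × Int) => d.insert a.1 a.2) PySem.Dict.empty l := rfl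
  rw [h2]
  simpa using h1

lemma pv_contains_ofList (l : List (Int × Int)) (q : Int)
    (h : (l.map Prod.fst).Nodup) :
    (PySem.Dict.ofList l).contains q = decide (q ∈ l.map Prod.fst) := by
  rw [PySem.Dict.contains_eq_decide_mem_keys]
  have hk : (PySem.Dict.ofList l).keys = l.map Prod.fst := by
    show (PySem.Dict.ofList l).items.map Prod.fst = _
    rw [pv_items_ofList h]
  rw [hk]

-- B computes exactly the capped list pvEmit, for any key-distinct list
lemma pvB_eq_emit : ∀ (l : List (Int × Int)) (N : Int),
    (l.map Prod.fst).Nodup → pvB l N = pvEmit l N := by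
  intro l
  induction l with
  | nil =>
    intro N _
    have h : (pvSums ([] : List (Int × Int))).findIdx? (fun t => decide (N ≤ t)) = none := by
      simp [pvSums]
    rw [pvB_none h]; rfl
  | cons x l ih =>
    obtain ⟨k, v⟩ := x
    intro N hnd
    have hnd2 : (k :: l.map Prod.fst).Nodup := by simpa using hnd
    have hk : k ∉ l.map Prod.fst := (List.nodup_cons.1 hnd2).1
    have hnd' : (l.map Prod.fst).Nodup := (List.nodup_cons.1 hnd2).2
    have hofnil : PySem.Dict.ofList ([] : List (Int × Int)) = PySem.Dict.empty := rfl
    by_cases hNv : N ≤ v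
    · -- cutoff at index 0
      have h0 : (pvSums ((k, v) :: l)).findIdx? (fun t => decide (N ≤ t)) = some 0 := by
        rw [pvSums_cons, List.findIdx?_cons]
        simp [hNv]
      rw [pvB_some h0]
      have hsl : PySem.List.slice ((k, v) :: l) none (some ((0 : Nat) : Int)) = [] := by
        rw [PySem.List.slice_to _ (by omega)]; simp
      rw [hsl, hofnil]
      rw [pvSums_cons]
      simp only [PySem.List.pyGetD_natCast, List.getD_cons_zero]
      rw [PySem.Dict.items_insert_of_not_contains _ _ (by simp [pysem])]
      rw [pvEmit]
      have hmin : min v N = N := min_eq_right hNv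
      simp [hmin]
      rfl
    · -- head passes in full; recurse with budget N - v
      have hv : v < N := lt_of_not_ge hNv
      have hfi0 : (pvSums ((k, v) :: l)).findIdx? (fun t => decide (N ≤ t))
          = Option.map (· + 1) ((pvSums l).findIdx? (fun t => decide (N - v ≤ t))) := by
        rw [pvSums_cons, List.findIdx?_cons, if_neg (by simp [hNv])]
        rw [List.findIdx?_map]
        have hfun : ((fun t => decide (N ≤ t)) ∘ fun x => v + x)
            = (fun t => decide (N - v ≤ t)) := by
          funext t; rw [Function.comp_apply, decide_eq_decide]; omega
        rw [hfun]
      have hEmit : pvEmit ((k, v) :: l) N = (k, v) :: pvEmit l (N - v) := by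
        rw [pvEmit]
        have hmin : min v N = v := min_eq_left (le_of_lt hv)
        simp [hmin, show ¬(N - v = 0) by omega]
      rw [hEmit, ← ih (N - v) hnd']
      cases hfi : (pvSums l).findIdx? (fun t => decide (N - v ≤ t)) with
      | none =>
        rw [pvB_none hfi, pvB_none (by rw [hfi0, hfi]; rfl)]
        rw [pv_items_ofList (by simpa using hnd), pv_items_ofList hnd']
      | some j =>
        have hjlen : j < (pvSums l).length :=
          (List.findIdx?_eq_some_iff_findIdx_eq.1 hfi).1
        have hjl : j < l.length := by rw [← pvSums_length l]; exact hjlen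
        rw [pvB_some hfi, pvB_some (by rw [hfi0, hfi]; rfl)]
        have hget1 : PySem.List.pyGetD ((k, v) :: l) ((j + 1 : Nat) : Int) ((0:Int), (0:Int))
            = PySem.List.pyGetD l ((j : Nat) : Int) ((0:Int), (0:Int)) := by
          rw [PySem.List.pyGetD_natCast, PySem.List.pyGetD_natCast, List.getD_cons_succ]
        have hget2 : PySem.List.pyGetD (pvSums ((k, v) :: l)) ((j + 1 : Nat) : Int) 0
            = v + PySem.List.pyGetD (pvSums l) ((j : Nat) : Int) 0 := by
          rw [pvSums_cons, PySem.List.pyGetD_natCast, PySem.List.pyGetD_natCast,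
            List.getD_cons_succ]
          simp only [List.getD_eq_getElem?_getD, List.getElem?_map]
          rw [List.getElem?_eq_getElem hjlen]
          simp
        have hsl : PySem.List.slice ((k, v) :: l) none (some ((j + 1 : Nat) : Int))
            = (k, v) :: l.take j := by
          rw [PySem.List.slice_to _ (by exact_mod_cast Nat.zero_le (j + 1))]
          simp [List.take_succ_cons]
        have hslj : PySem.List.slice l none (some ((j : Nat) : Int)) = l.take j := by
          rw [PySem.List.slice_to _ (by exact_mod_cast Nat.zero_le j)]
          simp
        rw [hget1, hget2, hsl, hslj]
        have htknd : ((l.take j).map Prod.fst).Nodup := by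
          rw [List.map_take]; exact (List.take_sublist j (l.map Prod.fst)).nodup hnd'
        have hknotin : k ∉ (l.take j).map Prod.fst := by
          rw [List.map_take]
          exact fun hmem => hk (List.mem_of_mem_take hmem)
        have hcons_nd : (((k, v) :: l.take j).map Prod.fst).Nodup := by
          simp only [List.map_cons]
          exact List.nodup_cons.2 ⟨hknotin, htknd⟩
        have hqj : (PySem.List.pyGetD l ((j : Nat) : Int) ((0:Int), (0:Int))).1 = (l[j]).1 := by
          rw [PySem.List.pyGetD_natCast, List.getD_eq_getElem?_getD,
            List.getElem?_eq_getElem hjl]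
          rfl
        have hjfst : (l.map Prod.fst)[j]'(by simpa using hjl) = (l[j]).1 := by simp
        have hfresh_take : (l[j]).1 ∉ (l.take j).map Prod.fst := by
          rw [List.map_take]
          intro hmem
          have hnm := pv_not_mem_take (l.map Prod.fst) j (by simpa using hjl) hnd'
          rw [hjfst] at hnm
          exact hnm hmem
        have hfresh_k : (l[j]).1 ≠ k := by
          intro he
          exact hk (he ▸ (List.mem_map.2 ⟨l[j], List.getElem_mem hjl, rfl⟩))
        rw [PySem.Dict.items_insert_of_not_contains _ _
            (by rw [pv_contains_ofList _ _ hcons_nd, hqj]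
                simp only [List.map_cons, decide_eq_false_iff_not, List.mem_cons]
                rintro (h1 | h2)
                · exact hfresh_k h1
                · exact hfresh_take h2),
          PySem.Dict.items_insert_of_not_contains _ _
            (by rw [pv_contains_ofList _ _ htknd, hqj]
                simpa using hfresh_take)]
        rw [pv_items_ofList hcons_nd, pv_items_ofList htknd, hqj]
        have hval : N - (v + PySem.List.pyGetD (pvSums l) ((j : Nat) : Int) 0
              - (PySem.List.pyGetD l ((j : Nat) : Int) ((0:Int), (0:Int))).2)
            = N - v - (PySem.List.pyGetD (pvSums l) ((j : Nat) : Int) 0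
              - (PySem.List.pyGetD l ((j : Nat) : Int) ((0:Int), (0:Int))).2) := by ring
        rw [hval]
        simp

-- A's loop appends exactly pvEmit to the accumulator dict, for fresh distinct keys
lemma pvLoopA_items : ∀ (l : List (Int × Int)) (N : Int) (r : PySem.Dict Int Int),
    (∀ p ∈ l, r.contains p.1 = false) → (l.map Prod.fst).Nodup →
    (pvLoopA l N r).items = r.items ++ pvEmit l N := by
  intro l
  induction l with
  | nil => intro N r _ _; simp [pvLoopA, pvEmit]
  | cons x l ih =>
    obtain ⟨k, n⟩ := x
    intro N r hfresh hnd
    have hk : r.contains k = false := hfresh (k, n) (by simp)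
    have hnd2 : (k :: l.map Prod.fst).Nodup := by simpa using hnd
    have hknotin : k ∉ l.map Prod.fst := (List.nodup_cons.1 hnd2).1
    have hnd' : (l.map Prod.fst).Nodup := (List.nodup_cons.1 hnd2).2
    show (if N - min n N = 0 then (r.insert k (min n N))
          else pvLoopA l (N - min n N) (r.insert k (min n N))).items
        = r.items ++ pvEmit ((k, n) :: l) N
    by_cases hstop : N - min n N = 0
    · rw [if_pos hstop, PySem.Dict.items_insert_of_not_contains _ _ hk]
      rw [pvEmit]
      simp [hstop]
    · rw [if_neg hstop]
      rw [ih (N - min n N) (r.insert k (min n N))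
        (by
          intro p hp
          rw [PySem.Dict.contains_insert]
          have h1 : r.contains p.1 = false := hfresh p (by simp [hp])
          have h2 : p.1 ≠ k := fun he => hknotin (he ▸ List.mem_map.2 ⟨p, hp, rfl⟩)
          simp [h1, h2])
        hnd']
      rw [PySem.Dict.items_insert_of_not_contains _ _ hk]
      rw [pvEmit]
      simp [hstop]

lemma pv_alt_eq_pvB (h_ : List (Int × Int)) (N : Int) :
    count_closest_alt h_ N
      = pvB (PySem.List.sorted (PySem.Dict.ofList h_).items (fun x => x.1) false) N := rfl

lemma pv_sorted_keys_nodup (h_ : List (Int × Int)) :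
    ((PySem.List.sorted (PySem.Dict.ofList h_).items (fun x => x.1) false).map
      Prod.fst).Nodup := by
  have hperm := (PySem.List.sorted_perm (PySem.Dict.ofList h_).items (fun x => x.1) false).map
    Prod.fst
  have hnd : ((PySem.Dict.ofList h_).items.map Prod.fst).Nodup :=
    PySem.Dict.nodup_keys_ofList h_
  exact hperm.nodup_iff.2 hnd

-- ===== VERDICT (by name: the statement is the Claim_ definition above) =====
theorem count_closest_spec : Claim_equal_count_closest := by
  intro h_ N _
  unfold Spec_count_closest
  rw [pv_alt_eq_pvB]
  have hnd := pv_sorted_keys_nodup h_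
  rw [pvB_eq_emit _ N hnd]
  show (pvLoopA _ N PySem.Dict.empty).items = _
  rw [pvLoopA_items _ N PySem.Dict.empty (by intro p _; simp [pysem]) hnd]
  rfl
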